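-- pv_equiv track=rewrite | github.com/nicolasgoyena/hiblooms | pages/2_Data_Catalog.py | choose_order_column
-- ===== SOURCE A (Python) =====
-- from typing import Any, Dict, List, Optional, Tuple
--
-- def choose_order_column(cols: List[Dict[str, Any]], pk: Optional[str]) -> str:
--     if pk:
--         return pk
--     candidates = ["updated_at", "created_at", "timestamp", "ts", "date"]
--     names = [c["name"] for c in cols]
--     for c in candidates:
--         if c in names:
--             return c
--     return names[0] if names else "1"
-- ===== SOURCE B (Python) =====
-- def choose_order_column(cols, pk):
--     if pk:
--         return pk
--     rank = {name: i for i, name in enumerate(["updated_at", "created_at", "timestamp", "ts", "date"])}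
--     names = [c["name"] for c in cols]
--     best = None
--     for name in names:
--         r = rank.get(name)
--         if r is not None and (best is None or r < best[0]):
--             best = (r, name)
--     if best is not None:
--         return best[1]
--     return names[0] if names else "1"
-- ===== Notes on version B (the rewrite author's own statement) =====
-- stated objective: alternative
-- what changed: Instead of scanning the fixed candidate list and testing membership in the column names for each, B builds a name-to-priority rank dict once and makes a single pass over the column names, keeping the name with the strictly smallest rank.
import Mathlib
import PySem

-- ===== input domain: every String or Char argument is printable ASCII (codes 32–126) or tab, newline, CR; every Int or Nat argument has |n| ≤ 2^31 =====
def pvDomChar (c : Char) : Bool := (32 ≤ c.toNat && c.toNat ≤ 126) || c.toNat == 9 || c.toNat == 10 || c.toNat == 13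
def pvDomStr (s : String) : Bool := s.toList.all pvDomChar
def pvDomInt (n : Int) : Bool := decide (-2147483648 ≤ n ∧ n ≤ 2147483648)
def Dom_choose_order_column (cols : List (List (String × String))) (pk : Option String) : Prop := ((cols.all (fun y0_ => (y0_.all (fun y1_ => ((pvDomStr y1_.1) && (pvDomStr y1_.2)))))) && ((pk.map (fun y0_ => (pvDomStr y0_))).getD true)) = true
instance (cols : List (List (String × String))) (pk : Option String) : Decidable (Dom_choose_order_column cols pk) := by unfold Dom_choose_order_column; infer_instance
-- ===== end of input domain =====

-- B replaces A's scan of the fixed candidate list (membership test per candidate) by one pass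
-- over the column names with a precomputed name→priority rank dict, keeping the minimal rank.

-- ===== PORT A =====
-- c["name"] for each dict in cols; KeyError (dict without "name") is excluded by Pre_, so getD "" is never hit there
def pvNames (cols : List (List (String × String))) : List String :=
  cols.map (fun c => ((PySem.Dict.mk c).get? "name").getD "")

def pvBodyA (cols : List (List (String × String))) : String :=
  match (["updated_at", "created_at", "timestamp", "ts", "date"] : List String).find?
      (fun c => (pvNames cols).contains c) with
  | some c => c
  | none => match pvNames cols with
    | [] => "1"
    | n :: _ => n

def choose_order_column (cols : List (List (String × String))) (pk : Option String) : String :=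
  match pk with
  | some s => if s = "" then pvBodyA cols else s
  | none => pvBodyA cols

-- ===== PORT B =====
def pvRank : PySem.Dict String Int :=
  (PySem.List.enumerate ["updated_at", "created_at", "timestamp", "ts", "date"]).foldl
    (fun d p => d.insert p.2 p.1) PySem.Dict.empty

def pvStep (best : Option (Int × String)) (name : String) : Option (Int × String) :=
  match pvRank.get? name with
  | none => best
  | some r =>
    match best with
    | none => some (r, name)
    | some (rb, _) => if r < rb then some (r, name) else best

def pvBodyB (cols : List (List (String × String))) : String :=
  match (pvNames cols).foldl pvStep none with
  | some (_, n) => n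
  | none => match pvNames cols with
    | [] => "1"
    | n :: _ => n

def choose_order_column_alt (cols : List (List (String × String))) (pk : Option String) : String :=
  match pk with
  | some s => if s = "" then pvBodyB cols else s
  | none => pvBodyB cols

-- ===== PRECONDITION & SPEC =====
-- Pre_ excludes exactly the inputs where A raises KeyError: pk is falsy (None or "") and some column dict lacks the key "name"
def Pre_choose_order_column (cols : List (List (String × String))) (pk : Option String) : Prop :=
  (pk.getD "" ≠ "") ∨ cols.all (fun c => ((PySem.Dict.mk c).get? "name").isSome) = true

instance (cols : List (List (String × String))) (pk : Option String) : Decidable (Pre_choose_order_column cols pk) := by unfold Pre_choose_order_column; infer_instance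

def pvWitness_choose_order_column : (List (List (String × String))) × Option String :=
  ([[("name", "updated_at")], [("name", "x")]], none)

def Spec_choose_order_column (cols : List (List (String × String))) (pk : Option String) (out : String) : Prop := out = choose_order_column_alt cols pk
instance (cols : List (List (String × String))) (pk : Option String) (out : String) : Decidable (Spec_choose_order_column cols pk out) := by unfold Spec_choose_order_column; infer_instance

-- ===== CLAIM (what is proved, stated in full; the proofs are below) =====
def Claim_equal_choose_order_column : Prop := ∀ (cols : List (List (String × String))) (pk : Option String), Dom_choose_order_column cols pk → Pre_choose_order_column cols pk → Spec_choose_order_column cols pk (choose_order_column cols pk)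

-- ===== LEMMAS AND PROOFS =====

-- the value of B's minimisation pass, expressed directly as a priority chain over membership
def pvBestOf (names : List String) : Option (Int × String) :=
  if names.contains "updated_at" then some (0, "updated_at")
  else if names.contains "created_at" then some (1, "created_at")
  else if names.contains "timestamp" then some (2, "timestamp")
  else if names.contains "ts" then some (3, "ts")
  else if names.contains "date" then some (4, "date")
  else none

def pvCombine (a b : Option (Int × String)) : Option (Int × String) :=
  match a, b with
  | none, b => b
  | a, none => a
  | some (ra, na), some (rb, nb) => if rb < ra then some (rb, nb) else some (ra, na)

def pvSingle (n : String) : Option (Int × String) := (pvRank.get? n).map (fun r => (r, n))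

lemma pvStep_eq_combine (a : Option (Int × String)) (n : String) :
    pvStep a n = pvCombine a (pvSingle n) := by
  unfold pvStep pvSingle pvCombine
  rcases h : pvRank.get? n with _ | r <;> rcases a with _ | ⟨ra, na⟩ <;> simp

lemma pvCombine_assoc (a b c : Option (Int × String)) :
    pvCombine (pvCombine a b) c = pvCombine a (pvCombine b c) := by
  unfold pvCombine
  rcases a with _ | ⟨ra, na⟩ <;> rcases b with _ | ⟨rb, nb⟩ <;> rcases c with _ | ⟨rc, nc⟩ <;>
    dsimp only [pvCombine] <;> split_ifs <;> dsimp only [] <;> split_ifs <;>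
      first | rfl | omega

lemma pvFoldl_combine (l : List String) (a : Option (Int × String)) :
    l.foldl pvStep a = pvCombine a (l.foldl pvStep none) := by
  induction l generalizing a with
  | nil => cases a <;> rfl
  | cons n ns ih =>
    simp only [List.foldl_cons, pvStep_eq_combine]
    rw [ih (pvCombine a (pvSingle n)), ih (pvCombine none (pvSingle n)), pvCombine_assoc]
    rfl

lemma pvFoldl_eq_bestOf (names : List String) :
    names.foldl pvStep none = pvBestOf names := by
  induction names with
  | nil => rfl
  | cons n ns ih =>
    rw [List.foldl_cons, pvFoldl_combine, ih]
    show pvCombine (pvStep none n) (pvBestOf ns) = pvBestOf (n :: ns)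
    rw [pvStep_eq_combine]
    by_cases h0 : n = "updated_at" <;> by_cases h1 : n = "created_at" <;>
      by_cases h2 : n = "timestamp" <;> by_cases h3 : n = "ts" <;> by_cases h4 : n = "date" <;>
      subst_vars <;>
      simp_all [pvSingle, pvRank, pvBestOf, pvCombine, PySem.List.enumerate,
        PySem.Dict.get?_insert, PySem.Dict.get?_empty] <;>
      split_ifs <;> simp_all

lemma pvFind_eq_bestOf (names : List String) :
    (["updated_at", "created_at", "timestamp", "ts", "date"] : List String).find?
        (fun c => names.contains c) = (pvBestOf names).map Prod.snd := by
  unfold pvBestOf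
  simp only [List.find?]
  by_cases h0 : names.contains "updated_at" <;> by_cases h1 : names.contains "created_at" <;>
    by_cases h2 : names.contains "timestamp" <;> by_cases h3 : names.contains "ts" <;>
    by_cases h4 : names.contains "date" <;> simp_all

-- ===== VERDICT (by name: the statement is the Claim_ definition above) =====
theorem choose_order_column_spec : Claim_equal_choose_order_column := by
  intro cols pk _ _
  have hbody : pvBodyA cols = pvBodyB cols := by
    unfold pvBodyA pvBodyB
    rw [pvFoldl_eq_bestOf, pvFind_eq_bestOf]
    cases h : pvBestOf (pvNames cols) with
    | none => rfl
    | some p => cases p; rfl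
  unfold Spec_choose_order_column choose_order_column choose_order_column_alt
  cases pk with
  | none => exact hbody
  | some s => dsimp only [] ; split_ifs <;> [exact hbody; rfl]
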